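-- pv_equiv track=rewrite | github.com/0xknxwledge/lvr.wtf | brontesLVR/running_total.py | calculate_running_total
-- ===== SOURCE A (Python) =====
-- BLOCK_RANGE = 100000  # Fixed block range for running total calculation
--
-- MERGE_BLOCK = 15537393  # The merge block number
--
-- def calculate_running_total(data):
--     sorted_blocks = sorted(data.keys())
--     first_block = sorted_blocks[0] if sorted_blocks else MERGE_BLOCK
--     last_block = sorted_blocks[-1] if sorted_blocks else MERGE_BLOCK
--
--     result = []
--     running_total = 0
--
--     for block in range(first_block, last_block + 1):
--         if block in data:
--             running_total += data[block]
--
--         if (block - MERGE_BLOCK) % BLOCK_RANGE == 0 or block == last_block: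
--             result.append({
--                 'block_number': block,
--                 'running_total': running_total
--             })
--
--     return result
-- ===== SOURCE B (Python) =====
-- BLOCK_RANGE = 100000  # Fixed block range for running total calculation
--
-- MERGE_BLOCK = 15537393  # The merge block number
--
-- def calculate_running_total(data):
--     # One merge pass over the sorted keys and the arithmetic checkpoint sequence,
--     # instead of iterating every block from first to last.
--     keys = sorted(data.keys())
--     first_block = keys[0] if keys else MERGE_BLOCK
--     last_block = keys[-1] if keys else MERGE_BLOCK
--
--     # Checkpoint blocks: every block in [first_block, last_block] congruent to
--     # MERGE_BLOCK mod BLOCK_RANGE, plus last_block itself if not already one.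
--     off = (first_block - MERGE_BLOCK) % BLOCK_RANGE
--     c = first_block if off == 0 else first_block + (BLOCK_RANGE - off)
--     checkpoints = []
--     while c <= last_block:
--         checkpoints.append(c)
--         c += BLOCK_RANGE
--     if not checkpoints or checkpoints[-1] != last_block:
--         checkpoints.append(last_block)
--
--     result = []
--     running_total = 0
--     i = 0
--     for cp in checkpoints:
--         while i < len(keys) and keys[i] <= cp:
--             running_total += data[keys[i]]
--             i += 1
--         result.append({'block_number': cp, 'running_total': running_total})
--     return result
-- ===== Notes on version B (the rewrite author's own statement) =====
-- stated objective: faster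
-- what changed: Instead of iterating every block from first to last key and testing each against the dict, B sorts the keys once, generates the checkpoint blocks arithmetically, and computes each checkpoint's running total in a single merge pass over the sorted keys.
import Mathlib
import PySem

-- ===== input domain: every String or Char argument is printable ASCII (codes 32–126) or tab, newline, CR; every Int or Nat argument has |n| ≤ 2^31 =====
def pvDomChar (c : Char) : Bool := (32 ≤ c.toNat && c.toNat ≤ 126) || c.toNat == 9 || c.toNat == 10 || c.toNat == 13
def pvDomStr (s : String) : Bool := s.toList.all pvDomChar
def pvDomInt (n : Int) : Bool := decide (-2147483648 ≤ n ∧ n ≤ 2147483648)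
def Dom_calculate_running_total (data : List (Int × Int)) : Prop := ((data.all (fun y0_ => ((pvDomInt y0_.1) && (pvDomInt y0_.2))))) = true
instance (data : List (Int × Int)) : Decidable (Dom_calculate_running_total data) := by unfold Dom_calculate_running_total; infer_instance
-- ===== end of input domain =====

-- B replaces A's block-by-block scan of the whole range [first, last] with a single merge pass
-- over the sorted keys and the arithmetically enumerated checkpoint blocks (same return value).

def BLOCK_RANGE : Int := 100000

def MERGE_BLOCK : Int := 15537393

-- ===== PORT A =====
def calculate_running_total (data : List (Int × Int)) : List (List (String × Int)) :=
  let d := PySem.Dict.ofList data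
  let sorted_blocks := PySem.List.sorted (PySem.Dict.keys d) (fun x => x)
  let first_block := sorted_blocks.headD MERGE_BLOCK
  let last_block := sorted_blocks.getLast?.getD MERGE_BLOCK
  ((PySem.List.pyRange first_block (last_block + 1)).foldl
    (fun (st : List (List (String × Int)) × Int) block =>
      let running_total :=
        if PySem.Dict.contains d block then st.2 + PySem.Dict.getD d block 0 else st.2
      if PySem.Int.mod (block - MERGE_BLOCK) BLOCK_RANGE = 0 ∨ block = last_block then
        (st.1 ++ [[("block_number", block), ("running_total", running_total)]], running_total)
      else (st.1, running_total))
    ([], 0)).1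

-- ===== PORT B =====
-- the `while c <= last_block` loop of Source B generating the checkpoint blocks
def cpFrom (c last : Int) : List Int :=
  if c ≤ last then c :: cpFrom (c + BLOCK_RANGE) last else []
termination_by (last + 1 - c).toNat
decreasing_by simp only [BLOCK_RANGE]; omega

-- the inner `while i < len(keys) and keys[i] <= cp` loop (remaining keys kept as a suffix)
def consumeKeys (d : PySem.Dict Int Int) (cp : Int) : List Int → Int → List Int × Int
  | [], t => ([], t)
  | k :: ks, t =>
    if k ≤ cp then consumeKeys d cp ks (t + PySem.Dict.getD d k 0) else (k :: ks, t)

-- the `for cp in checkpoints` merge loop of Source B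
def mergeCk (d : PySem.Dict Int Int) : List Int → List Int → Int → List (List (String × Int))
  | [], _, _ => []
  | cp :: cps, ks, t =>
    let st := consumeKeys d cp ks t
    [("block_number", cp), ("running_total", st.2)] :: mergeCk d cps st.1 st.2

def calculate_running_total_alt (data : List (Int × Int)) : List (List (String × Int)) :=
  let d := PySem.Dict.ofList data
  let keys := PySem.List.sorted (PySem.Dict.keys d) (fun x => x)
  let first_block := keys.headD MERGE_BLOCK
  let last_block := keys.getLast?.getD MERGE_BLOCK
  let off := PySem.Int.mod (first_block - MERGE_BLOCK) BLOCK_RANGE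
  let c := if off = 0 then first_block else first_block + (BLOCK_RANGE - off)
  let checkpoints := cpFrom c last_block
  let checkpoints :=
    if checkpoints = [] ∨ checkpoints.getLast? ≠ some last_block then checkpoints ++ [last_block]
    else checkpoints
  mergeCk d checkpoints keys 0

-- ===== PRECONDITION & SPEC =====
def Spec_calculate_running_total (data : List (Int × Int)) (out : List (List (String × Int))) : Prop := out = calculate_running_total_alt data
instance (data : List (Int × Int)) (out : List (List (String × Int))) : Decidable (Spec_calculate_running_total data out) := by unfold Spec_calculate_running_total; infer_instance

-- ===== CLAIM (what is proved, stated in full; the proofs are below) =====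
def Claim_equal_calculate_running_total : Prop := ∀ (data : List (Int × Int)), Dom_calculate_running_total data → Spec_calculate_running_total data (calculate_running_total data)

-- ===== LEMMAS AND PROOFS =====

-- sum of the stored values of the keys in `ks` that are ≤ c (the running total at block c)
def pvTle (d : PySem.Dict Int Int) (ks : List Int) (c : Int) : Int :=
  ((ks.filter (fun k => decide (k ≤ c))).map (fun k => PySem.Dict.getD d k 0)).sum

def pvEntry (c t : Int) : List (String × Int) :=
  [("block_number", c), ("running_total", t)]

lemma pvTle_congr (d : PySem.Dict Int Int) {ks : List Int} {a b : Int}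
    (h : ∀ k ∈ ks, (k ≤ a ↔ k ≤ b)) : pvTle d ks a = pvTle d ks b := by
  have hf : ks.filter (fun k => decide (k ≤ a)) = ks.filter (fun k => decide (k ≤ b)) :=
    List.filter_congr (fun x hx => by simp [h x hx])
  unfold pvTle
  rw [hf]

lemma pvTle_zero (d : PySem.Dict Int Int) {ks : List Int} {c : Int}
    (h : ∀ k ∈ ks, ¬ k ≤ c) : pvTle d ks c = 0 := by
  unfold pvTle
  rw [List.filter_eq_nil_iff.2 (fun x hx => by simpa using h x hx)]
  rfl

lemma pvTle_step (d : PySem.Dict Int Int) {ks : List Int} (hnd : ks.Nodup) (a : Int) :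
    pvTle d ks a = pvTle d ks (a - 1) + (if a ∈ ks then PySem.Dict.getD d a 0 else 0) := by
  induction ks with
  | nil => simp [pvTle]
  | cons k ks ih =>
    rcases List.nodup_cons.1 hnd with ⟨hknm, hnd'⟩
    have ihs := ih hnd'
    by_cases hka : k = a
    · subst hka
      have h1 : pvTle d ks k = pvTle d ks (k - 1) := pvTle_congr d (fun x hx => by
        have hne : x ≠ k := fun e => hknm (e ▸ hx)
        omega)
      rw [if_pos (List.mem_cons_self)]
      simp only [pvTle, List.filter_cons, decide_eq_true_eq]
      rw [if_pos (le_refl k), if_neg (by omega : ¬ k ≤ k - 1)]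
      simp only [List.map_cons, List.sum_cons]
      simp only [pvTle] at h1
      rw [h1]; ring
    · have hm : (a ∈ k :: ks) ↔ (a ∈ ks) := by
        simp [List.mem_cons, Ne.symm hka]
      have hif : (if a ∈ k :: ks then PySem.Dict.getD d a 0 else 0)
          = (if a ∈ ks then PySem.Dict.getD d a 0 else 0) := by
        by_cases h : a ∈ ks
        · rw [if_pos (hm.2 h), if_pos h]
        · rw [if_neg (fun hh => h (hm.1 hh)), if_neg h]
      rw [hif]
      simp only [pvTle, List.filter_cons, decide_eq_true_eq]
      by_cases hk : k ≤ a
      · rw [if_pos hk, if_pos (by omega : k ≤ a - 1)]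
        simp only [List.map_cons, List.sum_cons]
        simp only [pvTle] at ihs
        rw [ihs]; ring
      · rw [if_neg hk, if_neg (by omega : ¬ k ≤ a - 1)]
        simpa [pvTle] using ihs

-- A's loop over range(a, last + 1), characterised as a map over the filtered range
lemma A_loop (d : PySem.Dict Int Int) (ks : List Int)
    (hnd : ks.Nodup) (hcm : ∀ x : Int, PySem.Dict.contains d x = decide (x ∈ ks))
    (last : Int) :
    ∀ (n : Nat) (a : Int) (res : List (List (String × Int))) (t : Int),
      (last + 1 - a).toNat = n → t = pvTle d ks (a - 1) →
      ((PySem.List.pyRange a (last + 1)).foldl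
        (fun (st : List (List (String × Int)) × Int) block =>
          if PySem.Int.mod (block - MERGE_BLOCK) BLOCK_RANGE = 0 ∨ block = last then
            (st.1 ++ [[("block_number", block),
                ("running_total",
                  if PySem.Dict.contains d block then st.2 + PySem.Dict.getD d block 0 else st.2)]],
              if PySem.Dict.contains d block then st.2 + PySem.Dict.getD d block 0 else st.2)
          else (st.1,
            if PySem.Dict.contains d block then st.2 + PySem.Dict.getD d block 0 else st.2))
        (res, t)).1
      = res ++ ((PySem.List.pyRange a (last + 1)).filter
          (fun c => decide (PySem.Int.mod (c - MERGE_BLOCK) BLOCK_RANGE = 0 ∨ c = last))).map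
          (fun c => pvEntry c (pvTle d ks c)) := by
  intro n
  induction n with
  | zero =>
    intro a res t hn ht
    have hnil : PySem.List.pyRange a (last + 1) = [] := by
      rw [PySem.List.pyRange_one]
      have : (last + 1 - a).toNat = 0 := hn
      simp [this]
    simp [hnil]
  | succ n ihn =>
    intro a res t hn ht
    have halt : a < last + 1 := by omega
    rw [PySem.List.pyRange_one_cons halt]
    have hrt : (if PySem.Dict.contains d a then t + PySem.Dict.getD d a 0 else t)
        = pvTle d ks a := by
      rw [hcm, ht, pvTle_step d hnd a]
      by_cases h : a ∈ ks <;> simp [h]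
    simp only [List.foldl_cons, List.filter_cons]
    by_cases hck : PySem.Int.mod (a - MERGE_BLOCK) BLOCK_RANGE = 0 ∨ a = last
    · rw [if_pos hck]
      simp only [hrt]
      rw [ihn (a + 1) (res ++ [[("block_number", a), ("running_total", pvTle d ks a)]]) (pvTle d ks a) (by omega)
        (by rw [show a + 1 - 1 = a by ring])]
      simp [hck, pvEntry]
    · rw [if_neg hck]
      simp only [hrt]
      rw [ihn (a + 1) res (pvTle d ks a) (by omega) (by rw [show a + 1 - 1 = a by ring])]
      simp [hck]

lemma consumeKeys_spec (d : PySem.Dict Int Int) (cp : Int) :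
    ∀ (ks : List Int) (t : Int),
      consumeKeys d cp ks t =
        (ks.dropWhile (fun k => decide (k ≤ cp)),
         t + ((ks.takeWhile (fun k => decide (k ≤ cp))).map (fun k => PySem.Dict.getD d k 0)).sum) := by
  intro ks
  induction ks with
  | nil => intro t; simp [consumeKeys]
  | cons k ks ih =>
    intro t
    by_cases h : k ≤ cp
    · simp [consumeKeys, h, ih]
      ring
    · simp [consumeKeys, h]

lemma filter_le_eq_takeWhile {ks : List Int} (hp : ks.Pairwise (· ≤ ·)) (c : Int) :
    ks.filter (fun k => decide (k ≤ c)) = ks.takeWhile (fun k => decide (k ≤ c)) := by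
  induction ks with
  | nil => rfl
  | cons k ks ih =>
    rcases List.pairwise_cons.1 hp with ⟨hk, hp'⟩
    by_cases h : k ≤ c
    · simp [h, ih hp']
    · simp [h, List.filter_eq_nil_iff]
      intro x hx
      have := hk x hx
      omega

-- B's merge loop, characterised: each checkpoint receives the total of all keys ≤ it
lemma mergeCk_spec (d : PySem.Dict Int Int) :
    ∀ (cps ks : List Int) (t : Int), ks.Pairwise (· ≤ ·) → cps.Pairwise (· ≤ ·) →
      mergeCk d cps ks t = cps.map (fun c => pvEntry c (t + pvTle d ks c)) := by
  intro cps
  induction cps with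
  | nil => intro ks t _ _; simp [mergeCk]
  | cons cp cps ih =>
    intro ks t hks hcps
    rcases List.pairwise_cons.1 hcps with ⟨hcp, hcps'⟩
    have htw := filter_le_eq_takeWhile hks cp
    rw [mergeCk, consumeKeys_spec]
    have hks' : (ks.dropWhile (fun k => decide (k ≤ cp))).Pairwise (· ≤ ·) :=
      hks.sublist (List.dropWhile_sublist _)
    rw [ih _ _ hks' hcps']
    have hsplit : ∀ c' ∈ cps, pvTle d ks c'
        = ((ks.takeWhile (fun k => decide (k ≤ cp))).map (fun k => PySem.Dict.getD d k 0)).sum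
          + pvTle d (ks.dropWhile (fun k => decide (k ≤ cp))) c' := by
      intro c' hc'
      have hcc : cp ≤ c' := hcp c' hc'
      conv_lhs => rw [pvTle,
        ← List.takeWhile_append_dropWhile (p := fun k => decide (k ≤ cp)) (l := ks)]
      rw [List.filter_append, List.map_append, List.sum_append]
      have hfid : (ks.takeWhile (fun k => decide (k ≤ cp))).filter (fun k => decide (k ≤ c'))
          = ks.takeWhile (fun k => decide (k ≤ cp)) :=
        List.filter_eq_self.2 (fun x hx => by
          have := List.mem_takeWhile_imp hx
          simp at this ⊢
          omega)
      rw [hfid]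
      rfl
    have hT : pvTle d ks cp
        = ((ks.takeWhile (fun k => decide (k ≤ cp))).map (fun k => PySem.Dict.getD d k 0)).sum := by
      rw [pvTle, htw]
    simp only [List.map_cons, pvEntry, ← hT]
    congr 1
    apply List.map_congr_left
    intro c' hc'
    rw [hsplit c' hc', ← hT]
    simp [add_assoc]

lemma cpFrom_mem : ∀ {c last x : Int}, x ∈ cpFrom c last →
    c ≤ x ∧ x ≤ last ∧ (x - c) % BLOCK_RANGE = 0 := by
  intro c last x h
  fun_induction cpFrom c last with
  | case1 c h1 ih =>
    rcases List.mem_cons.1 h with rfl | hm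
    · simp [h1]
    · have := ih hm
      simp only [BLOCK_RANGE] at *
      omega
  | case2 c h1 => simp at h

lemma cpFrom_pairwise (c last : Int) : (cpFrom c last).Pairwise (· ≤ ·) := by
  fun_induction cpFrom c last with
  | case1 c h1 ih =>
    refine List.pairwise_cons.2 ⟨?_, ih⟩
    intro x hx
    have := cpFrom_mem hx
    simp only [BLOCK_RANGE] at *
    omega
  | case2 c h1 => simp

lemma cpFrom_getLast_of_mod (c last : Int)
    (hc : (c - MERGE_BLOCK) % BLOCK_RANGE = 0) (hl : (last - MERGE_BLOCK) % BLOCK_RANGE = 0)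
    (h : c ≤ last) : (cpFrom c last).getLast? = some last := by
  fun_induction cpFrom c last with
  | case1 c hle ih =>
    by_cases h2 : c + BLOCK_RANGE ≤ last
    · have htail := ih (by simp only [BLOCK_RANGE] at *; omega) h2
      cases hcp : cpFrom (c + BLOCK_RANGE) last with
      | nil => rw [hcp] at htail; simp at htail
      | cons y ys =>
        rw [hcp] at htail
        rw [List.getLast?_cons_cons]
        exact htail
    · have hcl : c = last := by simp only [BLOCK_RANGE, MERGE_BLOCK] at *; omega
      have hnil : cpFrom (c + BLOCK_RANGE) last = [] := by
        rw [cpFrom]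
        simp only [BLOCK_RANGE] at h2 ⊢
        rw [if_neg (by omega)]
      rw [hnil]
      simp [hcl]
  | case2 c hle => omega

-- the filtered range of A's checkpoint test equals B's arithmetically generated list
lemma F_eq (last : Int) :
    ∀ (n : Nat) (a : Int), (last + 1 - a).toNat = n → a ≤ last →
      (PySem.List.pyRange a (last + 1)).filter
          (fun c => decide (PySem.Int.mod (c - MERGE_BLOCK) BLOCK_RANGE = 0 ∨ c = last))
        = cpFrom (if PySem.Int.mod (a - MERGE_BLOCK) BLOCK_RANGE = 0 then a
                  else a + (BLOCK_RANGE - PySem.Int.mod (a - MERGE_BLOCK) BLOCK_RANGE)) last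
          ++ (if PySem.Int.mod (last - MERGE_BLOCK) BLOCK_RANGE = 0 then [] else [last]) := by
  have hRpos : (0:Int) < BLOCK_RANGE := by norm_num [BLOCK_RANGE]
  intro n
  induction n with
  | zero => intro a hn ha; omega
  | succ n ihn =>
    intro a hn ha
    rw [PySem.List.pyRange_one_cons (by omega), List.filter_cons]
    simp only [PySem.Int.mod_eq_emod_of_pos hRpos]
    by_cases hal : a = last
    · -- last block: the remaining range is empty
      subst hal
      have hnil : PySem.List.pyRange (a + 1) (a + 1) = [] := by
        rw [PySem.List.pyRange_one]; simp
      rw [hnil]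
      simp only [List.filter_nil, decide_eq_true_eq]
      rw [if_pos (Or.inr trivial)]
      by_cases hm : (a - MERGE_BLOCK) % BLOCK_RANGE = 0
      · rw [if_pos hm, if_pos hm]
        rw [cpFrom, if_pos (le_refl a), cpFrom,
          if_neg (by simp only [BLOCK_RANGE]; omega)]
        simp
      · rw [if_neg hm, if_neg hm]
        have : cpFrom (a + (BLOCK_RANGE - (a - MERGE_BLOCK) % BLOCK_RANGE)) a = [] := by
          rw [cpFrom, if_neg (by simp only [BLOCK_RANGE] at *; omega)]
        simp [this]
    · -- a < last
      have ih := ihn (a + 1) (by omega) (by omega)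
      simp only [PySem.Int.mod_eq_emod_of_pos hRpos] at ih
      rw [ih]
      by_cases hm : (a - MERGE_BLOCK) % BLOCK_RANGE = 0
      · rw [if_pos (by simp [hm]), if_pos hm]
        have hm1 : (a + 1 - MERGE_BLOCK) % BLOCK_RANGE = 1 := by
          simp only [BLOCK_RANGE] at *; omega
        rw [if_neg (by omega)]
        have hnext : a + 1 + (BLOCK_RANGE - (a + 1 - MERGE_BLOCK) % BLOCK_RANGE)
            = a + BLOCK_RANGE := by rw [hm1]; ring
        rw [hnext]
        conv_rhs => rw [cpFrom, if_pos ha]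
        simp
      · rw [if_neg (by simp [hm, hal]), if_neg hm]
        by_cases ho : (a - MERGE_BLOCK) % BLOCK_RANGE = BLOCK_RANGE - 1
        · have hm1 : (a + 1 - MERGE_BLOCK) % BLOCK_RANGE = 0 := by
            simp only [BLOCK_RANGE] at *; omega
          rw [if_pos hm1]
          have : a + (BLOCK_RANGE - (a - MERGE_BLOCK) % BLOCK_RANGE) = a + 1 := by
            rw [ho]; ring
          rw [this]
        · have hm1 : (a + 1 - MERGE_BLOCK) % BLOCK_RANGE
              = (a - MERGE_BLOCK) % BLOCK_RANGE + 1 := by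
            simp only [BLOCK_RANGE] at *; omega
          rw [if_neg (by simp only [BLOCK_RANGE] at *; omega)]
          have : a + 1 + (BLOCK_RANGE - (a + 1 - MERGE_BLOCK) % BLOCK_RANGE)
              = a + (BLOCK_RANGE - (a - MERGE_BLOCK) % BLOCK_RANGE) := by
            rw [hm1]; ring
          rw [this]

-- ===== VERDICT (by name: the statement is the Claim_ definition above) =====
theorem calculate_running_total_spec : Claim_equal_calculate_running_total := by
  intro data _
  unfold Spec_calculate_running_total calculate_running_total calculate_running_total_alt
  dsimp only
  set d := PySem.Dict.ofList data with hd
  set ks := PySem.List.sorted (PySem.Dict.keys d) (fun x => x) with hks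
  set first := ks.headD MERGE_BLOCK with hfirst
  set last := ks.getLast?.getD MERGE_BLOCK with hlast
  have hRpos : (0:Int) < BLOCK_RANGE := by norm_num [BLOCK_RANGE]
  have hnd : ks.Nodup :=
    (PySem.List.sorted_perm _ _ _).nodup_iff.2 (PySem.Dict.nodup_keys_ofList data)
  have hcm : ∀ x : Int, PySem.Dict.contains d x = decide (x ∈ ks) := by
    intro x
    rw [PySem.Dict.contains_eq_decide_mem_keys]
    simp [hks, PySem.List.mem_sorted]
  have hpair : ks.Pairwise (· ≤ ·) := by
    have := PySem.List.sorted_pairwise (PySem.Dict.keys d) (fun x => x)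
    simpa [hks] using this
  have hge : ∀ k ∈ ks, first ≤ k := by
    intro k hk
    cases hc : ks with
    | nil => rw [hc] at hk; simp at hk
    | cons x t =>
      rw [hfirst, hc]
      simp only [List.headD_cons]
      rw [hc] at hk hpair
      rcases List.mem_cons.1 hk with rfl | hm
      · exact le_refl _
      · exact (List.pairwise_cons.1 hpair).1 k hm
  have hlmem : ks ≠ [] → last ∈ ks := by
    intro hne
    rw [hlast]
    cases hgl : ks.getLast? with
    | none => exact absurd (List.getLast?_eq_none_iff.1 hgl) hne
    | some y => simpa using List.mem_of_getLast? hgl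
  have hfl : first ≤ last := by
    cases hc : ks with
    | nil => rw [hfirst, hlast, hc]; simp
    | cons x t => exact hge last (hlmem (by rw [hc]; simp))
  -- A's fold, characterised
  have hA := A_loop d ks hnd hcm last ((last + 1 - first).toNat) first [] 0 rfl
    (pvTle_zero d (fun k hk => by have := hge k hk; omega)).symm
  rw [List.nil_append] at hA
  rw [hA]
  -- B's checkpoint list equals the filtered range
  set off := PySem.Int.mod (first - MERGE_BLOCK) BLOCK_RANGE with hoff
  set c0 := if off = 0 then first else first + (BLOCK_RANGE - off) with hc0
  have hoffe : off = (first - MERGE_BLOCK) % BLOCK_RANGE := by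
    rw [hoff, PySem.Int.mod_eq_emod_of_pos hRpos]
  have hc0mod : (c0 - MERGE_BLOCK) % BLOCK_RANGE = 0 := by
    rw [hc0]
    split_ifs with h
    · rw [hoffe] at h; exact h
    · rw [hoffe] at h ⊢; simp only [BLOCK_RANGE, MERGE_BLOCK] at *; omega
  have hFeq := F_eq last ((last + 1 - first).toNat) first rfl hfl
  rw [← hoff, ← hc0] at hFeq
  rw [hFeq]
  have hcpmem : ∀ x ∈ cpFrom c0 last, x ≤ last := fun x hx => (cpFrom_mem hx).2.1
  by_cases hmod : (last - MERGE_BLOCK) % BLOCK_RANGE = 0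
  · -- last is itself a checkpoint: B does not append, and the tail is empty
    have hc0le : c0 ≤ last := by
      rw [hc0]
      split_ifs with h
      · exact hfl
      · rw [hoffe] at h ⊢; simp only [BLOCK_RANGE, MERGE_BLOCK] at *; omega
    have hlastcp := cpFrom_getLast_of_mod c0 last hc0mod hmod hc0le
    have hne : cpFrom c0 last ≠ [] := by
      rw [cpFrom, if_pos hc0le]; simp
    rw [if_neg (show ¬ (cpFrom c0 last = [] ∨ (cpFrom c0 last).getLast? ≠ some last) from
      fun h => h.elim (fun h1 => hne h1) (fun h2 => h2 hlastcp))]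
    rw [if_pos (show PySem.Int.mod (last - MERGE_BLOCK) BLOCK_RANGE = 0 by
      rw [PySem.Int.mod_eq_emod_of_pos hRpos]; exact hmod), List.append_nil]
    rw [mergeCk_spec d _ ks 0 hpair (cpFrom_pairwise c0 last)]
    simp
  · -- last is not on the grid: B appends it, and the tail is [last]
    have hnolast : ∀ x ∈ cpFrom c0 last, x ≠ last := by
      intro x hx hxe
      have h1 := cpFrom_mem hx
      subst hxe
      simp only [BLOCK_RANGE, MERGE_BLOCK] at *
      omega
    have hcond : cpFrom c0 last = [] ∨ (cpFrom c0 last).getLast? ≠ some last := by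
      cases hgl : (cpFrom c0 last).getLast? with
      | none => exact Or.inl (List.getLast?_eq_none_iff.1 hgl)
      | some y =>
        refine Or.inr ?_
        have : y ≠ last := hnolast y (List.mem_of_getLast? hgl)
        simp [this]
    rw [if_pos hcond]
    rw [if_neg (show ¬ PySem.Int.mod (last - MERGE_BLOCK) BLOCK_RANGE = 0 by
      rw [PySem.Int.mod_eq_emod_of_pos hRpos]; exact hmod)]
    have hpcks : (cpFrom c0 last ++ [last]).Pairwise (· ≤ ·) :=
      List.pairwise_append.2 ⟨cpFrom_pairwise c0 last, List.pairwise_singleton _ _,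
        fun a ha b hb => by rw [List.mem_singleton.1 hb]; exact hcpmem a ha⟩
    rw [mergeCk_spec d _ ks 0 hpair hpcks]
    simp
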